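-- pv_equiv track=rewrite | github.com/Lyppezin/Spoti-Sync | sync.py | normalize_artist
-- ===== SOURCE A (Python) =====
-- def normalize_artist(artist):
--     if not artist:
--         return ""
--
--     separators = [",", "&", "feat", "Feat", "ft.", "Ft."]
--     for sep in separators:
--         if sep in artist:
--             artist = artist.split(sep)[0]
--
--     return artist.strip()
-- ===== SOURCE B (Python) =====
-- def normalize_artist(artist):
--     separators = (",", "&", "feat", "Feat", "ft.", "Ft.")
--     for i in range(len(artist)):
--         if any(artist.startswith(sep, i) for sep in separators):
--             return artist[:i].strip()
--     return artist.strip()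
-- ===== Notes on version B (the rewrite author's own statement) =====
-- stated objective: alternative
-- what changed: B replaces A's sequential per-separator mutate-and-split loop by a single left-to-right scan that truncates at the first position where any separator starts (then strips); correctness rests on the fact that for these separators the earliest separator start determines the final cut.
import Mathlib
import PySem

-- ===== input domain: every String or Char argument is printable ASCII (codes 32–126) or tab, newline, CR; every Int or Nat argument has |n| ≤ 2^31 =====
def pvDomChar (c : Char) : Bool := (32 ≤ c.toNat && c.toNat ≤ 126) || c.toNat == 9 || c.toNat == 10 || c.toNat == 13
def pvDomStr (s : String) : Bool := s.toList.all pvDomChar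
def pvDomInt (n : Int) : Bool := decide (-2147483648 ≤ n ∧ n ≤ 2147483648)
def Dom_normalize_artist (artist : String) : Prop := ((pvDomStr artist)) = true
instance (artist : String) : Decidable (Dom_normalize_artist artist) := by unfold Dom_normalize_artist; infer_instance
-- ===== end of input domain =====

-- B rewrites A's sequential per-separator split loop as one left-to-right scan that cuts at the
-- first position where any separator starts (objective: alternative, same cost).

-- ===== PORT A =====
-- A's separator list, as lists of characters
def pvSepsA : List (List Char) :=
  [[','], ['&'], ['f','e','a','t'], ['F','e','a','t'], ['f','t','.'], ['F','t','.']]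

-- Literal port of A: the `if not artist: return ""` guard, then the loop
-- `if sep in artist: artist = artist.split(sep)[0]` over the separators, then `.strip()`.
-- Every separator literal is non-empty, so `split(sep)` never raises and returns a
-- non-empty list; the `[]` default of pyGetD at index 0 is therefore never used.
def normalize_artist (artist : String) : String :=
  if artist == "" then ""
  else
    String.mk (PySem.Chars.strip
      (pvSepsA.foldl
        (fun a sep =>
          if PySem.Chars.isIn sep a then PySem.List.pyGetD (PySem.Chars.splitOn a sep) 0 [] else a)
        artist.toList))

-- ===== PORT B =====
def pvSepsB : List (List Char) :=
  [[','], ['&'], ['f','e','a','t'], ['F','e','a','t'], ['f','t','.'], ['F','t','.']]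

-- B's scan over positions: `artist[:i]` at the first i where some separator starts
-- (`artist.startswith(sep, i)`), the whole string if none; ported as structural
-- recursion over the suffix at position i.
def pvScanB : List Char → List Char
  | [] => []
  | c :: rest =>
    if pvSepsB.any (fun sep => PySem.Chars.startswith (c :: rest) sep) then []
    else c :: pvScanB rest

def normalize_artist_alt (artist : String) : String :=
  String.mk (PySem.Chars.strip (pvScanB artist.toList))

-- ===== PRECONDITION & SPEC =====
def Spec_normalize_artist (artist : String) (out : String) : Prop := out = normalize_artist_alt artist
instance (artist : String) (out : String) : Decidable (Spec_normalize_artist artist out) := by unfold Spec_normalize_artist; infer_instance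

-- ===== CLAIM (what is proved, stated in full; the proofs are below) =====
def Claim_equal_normalize_artist : Prop := ∀ (artist : String), Dom_normalize_artist artist → Spec_normalize_artist artist (normalize_artist artist)

-- ===== LEMMAS AND PROOFS =====

-- first index at which sep occurs as a prefix of the corresponding suffix (l.length if none)
def pvFIdx (sep : List Char) : List Char → Nat
  | [] => 0
  | c :: rest => if sep.isPrefixOf (c :: rest) then 0 else pvFIdx sep rest + 1

lemma pvSeps_ne_nil : ∀ s ∈ pvSepsA, s ≠ [] := by decide

-- no separator's interior character equals any separator's first character
lemma pvNoStraddle : ∀ s1 ∈ pvSepsA, ∀ s2 ∈ pvSepsA, ∀ j, (hj : j < s2.length) → 0 < j →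
    s1.head? ≠ some s2[j] := by decide

lemma pvHead?_append (u v : List Char) (h : u ≠ []) : (u ++ v).head? = u.head? := by
  cases u with
  | nil => exact absurd rfl h
  | cons a t => rfl

lemma pvFIdx_min (sep l : List Char) : ∀ i < pvFIdx sep l, ¬ sep <+: l.drop i := by
  induction l with
  | nil => intro i hi; simp [pvFIdx] at hi
  | cons c rest ih =>
    intro i hi
    by_cases h : sep.isPrefixOf (c :: rest) = true
    · simp [pvFIdx, h] at hi
    · rw [pvFIdx, if_neg h] at hi
      cases i with
      | zero =>
        intro hpre
        exact h (List.isPrefixOf_iff_prefix.mpr (by simpa using hpre))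
      | succ j =>
        simpa only [List.drop_succ_cons] using ih j (by omega)

lemma pvFIdx_spec (sep l : List Char) (h : pvFIdx sep l < l.length) :
    sep <+: l.drop (pvFIdx sep l) := by
  induction l with
  | nil => simp [pvFIdx] at h
  | cons c rest ih =>
    by_cases hp : sep.isPrefixOf (c :: rest) = true
    · rw [pvFIdx, if_pos hp]
      simpa using List.isPrefixOf_iff_prefix.mp hp
    · rw [pvFIdx, if_neg hp] at h ⊢
      simp only [List.drop_succ_cons]
      exact ih (by simpa using h)

lemma pvFIdx_le_of_prefix (sep l : List Char) (j : Nat) (h : sep <+: l.drop j) :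
    pvFIdx sep l ≤ j := by
  by_contra hc
  push_neg at hc
  exact pvFIdx_min sep l j hc h

-- sep starts at f in l and fits before m, hence it starts at f in l.take m
lemma pvPrefix_take_of {sep l : List Char} {f m : Nat}
    (h : sep <+: l.drop f) (hfm : f + sep.length ≤ m) : sep <+: (l.take m).drop f := by
  rw [List.drop_take]
  exact List.prefix_take_iff.mpr ⟨h, by omega⟩

-- a start of sep inside l.take m is a start in l that fits before m
lemma pvPrefix_of_take {sep l : List Char} {f m : Nat} (hsep : sep ≠ [])
    (h : sep <+: (l.take m).drop f) : sep <+: l.drop f ∧ f + sep.length ≤ m := by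
  rw [List.drop_take] at h
  obtain ⟨hpre, hlen⟩ := List.prefix_take_iff.mp h
  have hpos : 0 < sep.length := by
    cases sep with
    | nil => exact absurd rfl hsep
    | cons _ _ => simp
  exact ⟨hpre, by omega⟩

lemma pvStraddle_false {l s1 s2 : List Char} {f m : Nat}
    (hs1 : s1 ∈ pvSepsA) (hs2 : s2 ∈ pvSepsA)
    (h1 : s1 <+: l.drop m) (h2 : s2 <+: l.drop f)
    (hfm : f < m) (hms : m < f + s2.length) : False := by
  obtain ⟨t, ht⟩ := h2
  obtain ⟨u, hu⟩ := h1
  have hlen : m - f < s2.length := by omega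
  have h1' : (l.drop f).drop (m - f) = l.drop m := by
    rw [List.drop_drop]; congr 1; omega
  have hd : l.drop m = s2.drop (m - f) ++ t := by
    rw [← h1', ← ht, List.drop_append_of_le_length (by omega)]
  have hne2 : s2.drop (m - f) ≠ [] := by
    have : (s2.drop (m - f)).length = s2.length - (m - f) := List.length_drop
    intro hnil
    rw [hnil] at this
    simp at this
    omega
  have hgl : (l.drop m).head? = some s2[m - f] := by
    rw [hd, pvHead?_append _ _ hne2, List.head?_drop, List.getElem?_eq_getElem hlen]
  have hgr : (l.drop m).head? = s1.head? := by
    rw [← hu, pvHead?_append _ _ (pvSeps_ne_nil s1 hs1)]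
  exact pvNoStraddle s1 hs1 s2 hs2 (m - f) hlen (by omega) (hgr.symm.trans hgl)

-- hypothesis shape carried through A's fold: m is the whole string or an occurrence start
-- of one of the separators
def pvGood (l : List Char) (m : Nat) : Prop :=
  m = l.length ∨ ∃ s1 ∈ pvSepsA, s1 <+: l.drop m

-- for these separators, an occurrence starting before a good cut m also ends by m
lemma pvNoOverhang {l sep : List Char} {m : Nat} (hsep : sep ∈ pvSepsA) (hm : m ≤ l.length)
    (hgood : pvGood l m) (hfm : pvFIdx sep l < m) : pvFIdx sep l + sep.length ≤ m := by
  have hspec := pvFIdx_spec sep l (by omega)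
  by_contra hcon
  push_neg at hcon
  rcases hgood with h | ⟨s1, hs1, hpre⟩
  · have hle : sep.length ≤ (l.drop (pvFIdx sep l)).length := hspec.length_le
    rw [List.length_drop] at hle
    omega
  · exact pvStraddle_false hs1 hsep hpre hspec hfm hcon

-- equation lemmas for PySem.Chars.splitOn.go
lemma pvGo_zero (sep l cur : List Char) (acc : List (List Char)) :
    PySem.Chars.splitOn.go sep 0 l cur acc = ((cur.reverse ++ l) :: acc).reverse := rfl

lemma pvGo_nil (sep cur : List Char) (fuel : Nat) (acc : List (List Char)) :
    PySem.Chars.splitOn.go sep (fuel + 1) [] cur acc = (cur.reverse :: acc).reverse := rfl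

lemma pvGo_cons (sep : List Char) (fuel : Nat) (c : Char) (rest cur : List Char)
    (acc : List (List Char)) :
    PySem.Chars.splitOn.go sep (fuel + 1) (c :: rest) cur acc =
      if sep.isPrefixOf (c :: rest) then
        PySem.Chars.splitOn.go sep fuel ((c :: rest).drop sep.length) [] (cur.reverse :: acc)
      else PySem.Chars.splitOn.go sep fuel rest (c :: cur) acc := rfl

lemma pvGo_acc (sep : List Char) : ∀ (fuel : Nat) (l cur : List Char) (acc : List (List Char)),
    PySem.Chars.splitOn.go sep fuel l cur acc =
      acc.reverse ++ PySem.Chars.splitOn.go sep fuel l cur [] := by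
  intro fuel
  induction fuel with
  | zero =>
    intro l cur acc
    rw [pvGo_zero, pvGo_zero]
    simp
  | succ fuel ih =>
    intro l cur acc
    cases l with
    | nil =>
      rw [pvGo_nil, pvGo_nil]
      simp
    | cons c rest =>
      rw [pvGo_cons, pvGo_cons]
      by_cases h : sep.isPrefixOf (c :: rest) = true
      · rw [if_pos h, if_pos h, ih _ _ (cur.reverse :: acc), ih _ _ [cur.reverse]]
        simp
      · rw [if_neg h, if_neg h]
        exact ih rest (c :: cur) acc

lemma pvGo_head (sep : List Char) :
    ∀ (fuel : Nat) (l cur : List Char), l.length < fuel →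
      ∃ tl, PySem.Chars.splitOn.go sep fuel l cur [] =
        (cur.reverse ++ l.take (pvFIdx sep l)) :: tl := by
  intro fuel
  induction fuel with
  | zero => intro l cur h; omega
  | succ fuel ih =>
    intro l cur h
    cases l with
    | nil =>
      refine ⟨[], ?_⟩
      rw [pvGo_nil]
      simp [pvFIdx]
    | cons c rest =>
      rw [pvGo_cons]
      by_cases hp : sep.isPrefixOf (c :: rest) = true
      · rw [if_pos hp, pvGo_acc]
        refine ⟨PySem.Chars.splitOn.go sep fuel ((c :: rest).drop sep.length) [] [], ?_⟩
        simp [pvFIdx, hp]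
      · rw [if_neg hp]
        obtain ⟨tl, htl⟩ := ih rest (c :: cur) (by simp at h ⊢; omega)
        refine ⟨tl, ?_⟩
        rw [htl, pvFIdx, if_neg hp]
        simp

lemma pvSplitOn_head (sep l : List Char) :
    ∃ tl, PySem.Chars.splitOn l sep = l.take (pvFIdx sep l) :: tl := by
  obtain ⟨tl, htl⟩ := pvGo_head sep (l.length + 1) l [] (by omega)
  refine ⟨tl, ?_⟩
  show PySem.Chars.splitOn.go sep (l.length + 1) l [] [] = _
  rw [htl]
  simp

-- one pass of A's loop body on the good truncation l.take m cuts at min m (pvFIdx sep l)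
lemma pvStep (l sep : List Char) (m : Nat) (hsep : sep ∈ pvSepsA) (hm : m ≤ l.length)
    (hgood : pvGood l m) :
    (if PySem.Chars.isIn sep (l.take m) then
        PySem.List.pyGetD (PySem.Chars.splitOn (l.take m) sep) 0 []
      else l.take m) = l.take (min m (pvFIdx sep l)) := by
  have hsepne : sep ≠ [] := pvSeps_ne_nil sep hsep
  have hpos : 0 < sep.length := by
    cases sep with
    | nil => exact absurd rfl hsepne
    | cons _ _ => simp
  by_cases hin : PySem.Chars.isIn sep (l.take m) = true
  · obtain ⟨j, hj⟩ := (PySem.Chars.exists_prefix_drop_iff_isIn sep (l.take m)).mpr hin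
    obtain ⟨hjl, hjm⟩ := pvPrefix_of_take hsepne hj
    have hfj : pvFIdx sep l ≤ j := pvFIdx_le_of_prefix sep l j hjl
    have hfm : pvFIdx sep l < m := by omega
    have hfull : pvFIdx sep l + sep.length ≤ m := pvNoOverhang hsep hm hgood hfm
    have hspec := pvFIdx_spec sep l (by omega)
    have hfa : pvFIdx sep (l.take m) = pvFIdx sep l := by
      have h1 : pvFIdx sep (l.take m) ≤ pvFIdx sep l :=
        pvFIdx_le_of_prefix sep (l.take m) _ (pvPrefix_take_of hspec hfull)
      have h2 : ¬ pvFIdx sep (l.take m) < pvFIdx sep l := by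
        intro hlt2
        have hlen_take : (l.take m).length = m := by rw [List.length_take]; omega
        have hsp2 := pvFIdx_spec sep (l.take m) (by omega)
        exact pvFIdx_min sep l _ hlt2 (pvPrefix_of_take hsepne hsp2).1
      omega
    rw [if_pos hin]
    obtain ⟨tl, htl⟩ := pvSplitOn_head sep (l.take m)
    rw [htl, PySem.List.pyGetD_zero_cons, hfa, List.take_take]
    congr 1
    omega
  · rw [if_neg hin]
    have hmf : m ≤ pvFIdx sep l := by
      by_contra hcon
      push_neg at hcon
      have hfull : pvFIdx sep l + sep.length ≤ m := pvNoOverhang hsep hm hgood hcon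
      have hspec := pvFIdx_spec sep l (by omega)
      exact hin ((PySem.Chars.exists_prefix_drop_iff_isIn sep (l.take m)).mp
        ⟨pvFIdx sep l, pvPrefix_take_of hspec hfull⟩)
    congr 1
    omega

-- A's whole fold on a good truncation, tracking the running minimum cut
lemma pvFold (l : List Char) : ∀ (Q : List (List Char)), (∀ s ∈ Q, s ∈ pvSepsA) →
    ∀ m, m ≤ l.length → pvGood l m →
    Q.foldl
        (fun a sep =>
          if PySem.Chars.isIn sep a then PySem.List.pyGetD (PySem.Chars.splitOn a sep) 0 [] else a)
        (l.take m)
      = l.take (Q.foldl (fun k sep => min k (pvFIdx sep l)) m) := by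
  intro Q
  induction Q with
  | nil => intro _ m _ _; rfl
  | cons sep Q ih =>
    intro hmem m hm hgood
    have hsep : sep ∈ pvSepsA := hmem sep (by simp)
    simp only [List.foldl_cons]
    rw [pvStep l sep m hsep hm hgood]
    refine ih (fun s hs => hmem s (by simp [hs])) (min m (pvFIdx sep l)) (by omega) ?_
    rcases Nat.lt_or_ge (pvFIdx sep l) m with h | h
    · exact Or.inr ⟨sep, hsep, by
        rw [min_eq_right (by omega)]
        exact pvFIdx_spec sep l (by omega)⟩
    · rw [min_eq_left (by omega)]
      exact hgood

-- B side: first position where ANY separator starts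
def pvFAny : List Char → Nat
  | [] => 0
  | c :: rest => if pvSepsA.any (fun sep => sep.isPrefixOf (c :: rest)) then 0 else pvFAny rest + 1

lemma pvScanB_eq (l : List Char) : pvScanB l = l.take (pvFAny l) := by
  induction l with
  | nil => rfl
  | cons c rest ih =>
    have he : pvSepsB.any (fun sep => PySem.Chars.startswith (c :: rest) sep)
        = pvSepsA.any (fun sep => sep.isPrefixOf (c :: rest)) := by
      rfl
    rw [pvScanB, pvFAny, he]
    by_cases h : pvSepsA.any (fun sep => sep.isPrefixOf (c :: rest)) = true
    · simp [h]
    · simp [h, ih]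

lemma pvFoldl_min_le (g : List Char → Nat) :
    ∀ (Q : List (List Char)) (m₀ : Nat), Q.foldl (fun k s => min k (g s)) m₀ ≤ m₀ := by
  intro Q
  induction Q with
  | nil => intro m₀; simp
  | cons s Q ih =>
    intro m₀
    simp only [List.foldl_cons]
    exact le_trans (ih (min m₀ (g s))) (by omega)

lemma pvFoldl_min_le_mem (g : List Char → Nat) :
    ∀ (Q : List (List Char)) (m₀ : Nat) (s : List Char), s ∈ Q →
      Q.foldl (fun k t => min k (g t)) m₀ ≤ g s := by
  intro Q
  induction Q with
  | nil => intro _ s hs; simp at hs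
  | cons t Q ih =>
    intro m₀ s hs
    simp only [List.foldl_cons]
    rcases List.mem_cons.mp hs with h | h
    · subst h
      exact le_trans (pvFoldl_min_le g Q _) (by omega)
    · exact ih _ s h

lemma pvFoldl_min_succ (g h : List Char → Nat) :
    ∀ (Q : List (List Char)) (m₀ : Nat), (∀ s ∈ Q, g s = h s + 1) →
      Q.foldl (fun k s => min k (g s)) (m₀ + 1) = Q.foldl (fun k s => min k (h s)) m₀ + 1 := by
  intro Q
  induction Q with
  | nil => intro m₀ _; rfl
  | cons t Q ih =>
    intro m₀ hgh
    simp only [List.foldl_cons]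
    rw [hgh t (by simp), Nat.succ_min_succ]
    exact ih _ (fun s hs => hgh s (by simp [hs]))

lemma pvFAny_eq (l : List Char) :
    pvFAny l = pvSepsA.foldl (fun k sep => min k (pvFIdx sep l)) l.length := by
  induction l with
  | nil => decide
  | cons c rest ih =>
    by_cases h : pvSepsA.any (fun sep => sep.isPrefixOf (c :: rest)) = true
    · obtain ⟨sep, hsep, hp⟩ := List.any_eq_true.mp h
      have h1 : List.foldl (fun k sep => min k (pvFIdx sep (c :: rest))) (c :: rest).length
          pvSepsA ≤ pvFIdx sep (c :: rest) :=
        pvFoldl_min_le_mem _ pvSepsA _ sep hsep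
      have h2 : pvFIdx sep (c :: rest) = 0 := by rw [pvFIdx, if_pos hp]
      rw [pvFAny, if_pos h]
      omega
    · have hall : ∀ s ∈ pvSepsA, pvFIdx s (c :: rest) = pvFIdx s rest + 1 := by
        intro s hs
        have hnp : ¬ s.isPrefixOf (c :: rest) = true := by
          intro hc
          exact h (List.any_eq_true.mpr ⟨s, hs, hc⟩)
        rw [pvFIdx, if_neg hnp]
      rw [pvFAny, if_neg h, List.length_cons, pvFoldl_min_succ _ _ _ _ hall, ih]

-- the two list-level computations agree
lemma pvLists_eq (l : List Char) :
    pvSepsA.foldl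
        (fun a sep =>
          if PySem.Chars.isIn sep a then PySem.List.pyGetD (PySem.Chars.splitOn a sep) 0 [] else a)
        l
      = pvScanB l := by
  have h := pvFold l pvSepsA (fun _ hs => hs) l.length le_rfl (Or.inl rfl)
  rw [List.take_length] at h
  rw [h, pvScanB_eq, pvFAny_eq]

-- ===== VERDICT (by name: the statement is the Claim_ definition above) =====
theorem normalize_artist_spec : Claim_equal_normalize_artist := by
  intro artist _
  show normalize_artist artist = normalize_artist_alt artist
  unfold normalize_artist normalize_artist_alt
  by_cases h : artist == ""
  · rw [if_pos h]
    have : artist = "" := eq_of_beq h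
    subst this
    rfl
  · rw [if_neg h, pvLists_eq]
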